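-- pv_equiv track=rewrite | github.com/krolikowski80/studia_WSB | Algorytmy_i_Struktury_Danych/zajecia/lab4_zajecia.py | postoffice
-- ===== SOURCE A (Python) =====
-- from collections import deque
-- from collections import deque
--
-- def postoffice(customers):
--     line = deque(customers)
--     left_postoffice = []
--
--     while line:
--         name, must_back = line.popleft()
--
--         if must_back:
--             line.append((name, False))
--         else:
--             left_postoffice.append(name)
--
--     return left_postoffice
-- ===== SOURCE B (Python) =====
-- def postoffice(customers):
--     stay = []
--     back = []
--     for c in customers:
--         name, must_back = c
--         if must_back:
--             back.append(name)
--         else: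
--             stay.append(name)
--     return stay + back
-- ===== Notes on version B (the rewrite author's own statement) =====
-- stated objective: simpler
-- what changed: Replaces the deque simulation (re-enqueueing every must-back customer) with a single pass partitioning names into a stay list and a back list, returning their concatenation.
import Mathlib
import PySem

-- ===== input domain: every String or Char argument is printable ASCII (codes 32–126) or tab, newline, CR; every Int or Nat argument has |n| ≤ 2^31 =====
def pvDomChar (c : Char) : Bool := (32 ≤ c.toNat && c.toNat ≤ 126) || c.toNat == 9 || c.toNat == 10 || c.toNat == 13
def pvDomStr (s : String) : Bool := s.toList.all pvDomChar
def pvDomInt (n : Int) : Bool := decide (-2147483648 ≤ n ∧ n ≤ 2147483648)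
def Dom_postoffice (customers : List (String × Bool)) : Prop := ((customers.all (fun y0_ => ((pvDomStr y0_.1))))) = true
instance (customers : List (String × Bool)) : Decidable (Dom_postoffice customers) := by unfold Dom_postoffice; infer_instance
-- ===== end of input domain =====

-- B is simpler: a single pass partitioning customers into two lists instead of a deque simulation with re-enqueueing.

-- ===== PORT A =====
-- the 'while line' loop with the deque 'line' and the accumulator 'left_postoffice'
def postofficeLoop (line : List (String × Bool)) (left : List String) : List String :=
  match line with
  | [] => left
  | (name, mustBack) :: rest =>
    if _h : mustBack then postofficeLoop (rest ++ [(name, false)]) left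
    else postofficeLoop rest (left ++ [name])
termination_by line.length + line.countP (fun c => c.2)
decreasing_by
  all_goals simp_all [List.countP_append]

def postoffice (customers : List (String × Bool)) : List String :=
  postofficeLoop customers []

-- ===== PORT B =====
-- single pass: partition names into 'stay' and 'back', return stay ++ back
def postoffice_alt (customers : List (String × Bool)) : List String :=
  let p := customers.foldl
    (fun (sb : List String × List String) (c : String × Bool) =>
      if c.2 then (sb.1, sb.2 ++ [c.1]) else (sb.1 ++ [c.1], sb.2))
    ([], [])
  p.1 ++ p.2

-- ===== PRECONDITION & SPEC =====
def Spec_postoffice (customers : List (String × Bool)) (out : List String) : Prop := out = postoffice_alt customers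
instance (customers : List (String × Bool)) (out : List String) : Decidable (Spec_postoffice customers out) := by unfold Spec_postoffice; infer_instance

-- ===== CLAIM (what is proved, stated in full; the proofs are below) =====
def Claim_equal_postoffice : Prop := ∀ (customers : List (String × Bool)), Dom_postoffice customers → Spec_postoffice customers (postoffice customers)

-- ===== LEMMAS AND PROOFS =====

-- A's loop flattens to: falses' names in order, then trues' names in order
theorem postofficeLoop_eq (line : List (String × Bool)) (left : List String) :
    postofficeLoop line left =
      left ++ (line.filter (fun c => !c.2)).map Prod.fst
           ++ (line.filter (fun c => c.2)).map Prod.fst := by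
  induction line, left using postofficeLoop.induct with
  | case1 left => simp [postofficeLoop]
  | case2 left name rest ih =>
      rw [postofficeLoop]
      simp only [dite_true]
      rw [ih]
      simp [List.filter_append, List.map_append]
  | case3 left name mustBack rest h ih =>
      rw [postofficeLoop]
      simp only [h]
      rw [ih]
      simp

-- B's fold computes the two buckets
theorem postoffice_alt_fold (customers : List (String × Bool)) (stay back : List String) :
    customers.foldl
      (fun (sb : List String × List String) (c : String × Bool) =>
        if c.2 then (sb.1, sb.2 ++ [c.1]) else (sb.1 ++ [c.1], sb.2))
      (stay, back) =
    (stay ++ (customers.filter (fun c => !c.2)).map Prod.fst,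
     back ++ (customers.filter (fun c => c.2)).map Prod.fst) := by
  induction customers generalizing stay back with
  | nil => simp
  | cons c rest ih =>
      by_cases h : c.2 <;> simp [h, ih]

-- ===== VERDICT (by name: the statement is the Claim_ definition above) =====
theorem postoffice_spec : Claim_equal_postoffice := by
  intro customers _
  unfold Spec_postoffice postoffice postoffice_alt
  rw [postofficeLoop_eq, postoffice_alt_fold]
  simp
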